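-- pv_equiv track=rewrite | github.com/sashavershkova/Repeat | main.py | first_uncommon
-- ===== SOURCE A (Python) =====
-- def first_uncommon(matrix, n):
--     # Your implementation here!
--
--     freq_dict = {}
--
--     for tup in matrix:
--         for char in tup:
--             freq_dict[char] = freq_dict.get(char, 0) + 1
--
--     for k, v in freq_dict.items():
--         if v < n:
--             return k
-- ===== SOURCE B (Python) =====
-- def first_uncommon(matrix, n):
--     flat = [c for tup in matrix for c in tup]
--     # sort-and-group pass: collect the "common" elements (count >= n) by run lengths
--     common = set()
--     run, run_len = None, 0
--     for c in sorted(flat):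
--         if c == run:
--             run_len += 1
--         else:
--             if run is not None and run_len >= n:
--                 common.add(run)
--             run, run_len = c, 1
--     if run is not None and run_len >= n:
--         common.add(run)
--     for c in flat:
--         if c not in common:
--             return c
--     return None
-- ===== Notes on version B (the rewrite author's own statement) =====
-- stated objective: alternative
-- what changed: Replaces A's frequency-dict pass with sort-and-group: B sorts the flattened matrix, scans run lengths of equal elements to build a set of 'common' elements (count >= n), then returns the first flat element outside that set; correct because dict insertion order equals first-appearance order, so A's first key with count < n is the first flat element with count < n.
import Mathlib
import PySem

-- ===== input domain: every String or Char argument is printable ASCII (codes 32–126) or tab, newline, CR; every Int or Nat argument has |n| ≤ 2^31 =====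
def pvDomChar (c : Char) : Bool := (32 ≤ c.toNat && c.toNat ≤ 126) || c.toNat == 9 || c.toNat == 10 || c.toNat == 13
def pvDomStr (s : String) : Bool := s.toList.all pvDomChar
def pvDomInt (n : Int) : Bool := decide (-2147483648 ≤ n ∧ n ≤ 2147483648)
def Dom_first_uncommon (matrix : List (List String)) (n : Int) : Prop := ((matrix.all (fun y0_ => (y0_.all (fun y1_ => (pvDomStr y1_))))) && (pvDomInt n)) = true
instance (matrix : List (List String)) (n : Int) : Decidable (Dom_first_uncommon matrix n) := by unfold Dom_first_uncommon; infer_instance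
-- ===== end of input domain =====

-- B replaces A's frequency dict by sort-and-group: it sorts the flattened matrix, collects the
-- "common" elements (run length >= n) into a set, and returns the first flat element outside it
-- (objective: alternative; not faster).

-- ===== PORT A =====
-- the 'for k, v in freq_dict.items(): if v < n: return k' loop
def pvItemsBelow (n : Int) : List (String × Int) → Option String
  | [] => none
  | (k, v) :: rest => if v < n then some k else pvItemsBelow n rest

def first_uncommon (matrix : List (List String)) (n : Int) : Option String :=
  let freq := matrix.foldl
    (fun d tup => tup.foldl (fun d c => d.insert c (d.getD c 0 + 1)) d)
    (PySem.Dict.empty : PySem.Dict String Int)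
  pvItemsBelow n freq.items

-- ===== PORT B =====
-- the flush at a run boundary: 'if run is not None and run_len >= n: common.add(run)'
def pvFlush (n : Int) (run : Option String) (len : Int) (com : PySem.Set String) : PySem.Set String :=
  match run with
  | some r => if n ≤ len then PySem.Set.add com r else com
  | none => com

-- the 'for c in sorted(flat): …' run-length loop, returning the final common set
def pvRunLoop (n : Int) : List String → Option String → Int → PySem.Set String → PySem.Set String
  | [], run, len, com => pvFlush n run len com
  | c :: t, run, len, com =>
      if some c == run then pvRunLoop n t run (len + 1) com
      else pvRunLoop n t (some c) 1 (pvFlush n run len com)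

-- the 'for c in flat: if c not in common: return c' loop
def pvScanNotCommon (com : PySem.Set String) : List String → Option String
  | [] => none
  | c :: t => if PySem.Set.contains com c then pvScanNotCommon com t else some c

def first_uncommon_alt (matrix : List (List String)) (n : Int) : Option String :=
  let flat := matrix.flatMap (fun tup => tup)
  let common := pvRunLoop n (PySem.List.sorted flat (fun x => x) false) none 0 PySem.Set.empty
  pvScanNotCommon common flat

-- ===== PRECONDITION & SPEC =====
def Spec_first_uncommon (matrix : List (List String)) (n : Int) (out : Option String) : Prop := out = first_uncommon_alt matrix n
instance (matrix : List (List String)) (n : Int) (out : Option String) : Decidable (Spec_first_uncommon matrix n out) := by unfold Spec_first_uncommon; infer_instance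

-- ===== CLAIM (what is proved, stated in full; the proofs are below) =====
def Claim_equal_first_uncommon : Prop := ∀ (matrix : List (List String)) (n : Int), Dom_first_uncommon matrix n → Spec_first_uncommon matrix n (first_uncommon matrix n)

-- ===== LEMMAS AND PROOFS =====

-- A's items loop is find? over the keys when every value is determined by its key
theorem pvItemsBelow_map (n : Int) (f : String → Int) (ys : List String) :
    pvItemsBelow n (ys.map (fun k => (k, f k))) = ys.find? (fun k => decide (f k < n)) := by
  induction ys with
  | nil => rfl
  | cons a t ih =>
      simp only [List.map_cons, pvItemsBelow, List.find?]
      by_cases h : f a < n <;> simp [h, ih]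

-- membership in the run loop's result, for a sorted tail whose elements all dominate the open run
theorem mem_pvRunLoop_some (n : Int) (x : String) :
    ∀ (l : List String) (r : String) (k : Int) (com : PySem.Set String),
      l.Pairwise (· ≤ ·) → (∀ y ∈ l, r ≤ y) →
      (x ∈ pvRunLoop n l (some r) k com ↔
        x ∈ com ∨ (x = r ∧ n ≤ k + (l.count r : Int)) ∨
          (x ∈ l ∧ x ≠ r ∧ n ≤ (l.count x : Int))) := by
  intro l
  induction l with
  | nil =>
      intro r k com _ _
      simp only [pvRunLoop, pvFlush, List.count_nil]
      by_cases h : n ≤ k <;> simp [h, PySem.Set.mem_add, or_comm, and_comm]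
  | cons c t ih =>
      intro r k com hs hr
      have hst : t.Pairwise (· ≤ ·) := (List.pairwise_cons.mp hs).2
      have hct : ∀ y ∈ t, c ≤ y := (List.pairwise_cons.mp hs).1
      by_cases hcr : c = r
      · subst hcr
        simp only [pvRunLoop]
        rw [if_pos (by simp : (some c == some c) = true)]
        rw [ih c (k + 1) com hst hct]
        constructor
        · rintro (h | ⟨h1, h2⟩ | ⟨h1, h2, h3⟩)
          · exact Or.inl h
          · exact Or.inr (Or.inl ⟨h1, by simp [List.count_cons_self]; omega⟩)
          · exact Or.inr (Or.inr ⟨List.mem_cons_of_mem _ h1, h2,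
              by rwa [List.count_cons_of_ne (Ne.symm h2)]⟩)
        · rintro (h | ⟨h1, h2⟩ | ⟨h1, h2, h3⟩)
          · exact Or.inl h
          · exact Or.inr (Or.inl ⟨h1, by simp [List.count_cons_self] at h2 ⊢; omega⟩)
          · have h1' : x ∈ t := by
              rcases List.mem_cons.mp h1 with h | h
              · exact absurd h h2
              · exact h
            exact Or.inr (Or.inr ⟨h1', h2, by rwa [List.count_cons_of_ne (Ne.symm h2)] at h3⟩)
      · -- run boundary: r < c ≤ every element of t, so r never occurs again
        have hbe : (some c == some r) = false := by
          simp [hcr]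
        simp only [pvRunLoop, hbe, Bool.false_eq_true, if_false]
        have hrc : r ≤ c := hr c (List.mem_cons_self)
        have hrnotin : r ∉ (c :: t) := by
          intro hmem
          rcases List.mem_cons.mp hmem with h | h
          · exact hcr h.symm
          · exact hcr (le_antisymm (hct r h) hrc)
        rw [ih c 1 (pvFlush n (some r) k com) hst hct]
        have hcount_r : (c :: t).count r = 0 := List.count_eq_zero.mpr hrnotin
        have hflush : x ∈ pvFlush n (some r) k com ↔ x ∈ com ∨ (x = r ∧ n ≤ k) := by
          simp only [pvFlush]
          by_cases h : n ≤ k <;> simp [h, PySem.Set.mem_add, and_comm]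
        rw [hflush]
        constructor
        · rintro ((h | ⟨h1, h2⟩) | ⟨h1, h2⟩ | ⟨h1, h2, h3⟩)
          · exact Or.inl h
          · exact Or.inr (Or.inl ⟨h1, by rw [h1] at *; rw [hcount_r]; omega⟩)
          · subst h1
            refine Or.inr (Or.inr ⟨List.mem_cons_self, fun h => hcr h, ?_⟩)
            · simp [List.count_cons_self]; omega
          · refine Or.inr (Or.inr ⟨List.mem_cons_of_mem _ h1, ?_, ?_⟩)
            · intro hxr; subst hxr
              exact hrnotin (List.mem_cons_of_mem _ h1)
            · by_cases hxc : x = c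
              · subst hxc; simp [List.count_cons_self]; omega
              · rwa [List.count_cons_of_ne (Ne.symm hxc)]
        · rintro (h | ⟨h1, h2⟩ | ⟨h1, h2, h3⟩)
          · exact Or.inl (Or.inl h)
          · subst h1
            rw [hcount_r] at h2
            exact Or.inl (Or.inr ⟨rfl, by omega⟩)
          · by_cases hxc : x = c
            · subst hxc
              rw [List.count_cons_self] at h3
              exact Or.inr (Or.inl ⟨rfl, by omega⟩)
            · have hxt : x ∈ t := by
                rcases List.mem_cons.mp h1 with h | h
                · exact absurd h hxc
                · exact h
              rw [List.count_cons_of_ne (Ne.symm hxc)] at h3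
              exact Or.inr (Or.inr ⟨hxt, hxc, h3⟩)

-- top-level membership: x is collected iff it occurs at least n times in the sorted list
theorem mem_pvRunLoop (n : Int) (x : String) (l : List String) (hs : l.Pairwise (· ≤ ·)) :
    x ∈ pvRunLoop n l none 0 PySem.Set.empty ↔ x ∈ l ∧ n ≤ (l.count x : Int) := by
  cases l with
  | nil => simp [pvRunLoop, pvFlush, PySem.Set.empty]
  | cons c t =>
      have hst : t.Pairwise (· ≤ ·) := (List.pairwise_cons.mp hs).2
      have hct : ∀ y ∈ t, c ≤ y := (List.pairwise_cons.mp hs).1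
      have hbe : (some c == (none : Option String)) = false := by rfl
      simp only [pvRunLoop, hbe, Bool.false_eq_true, if_false, pvFlush]
      rw [mem_pvRunLoop_some n x t c 1 PySem.Set.empty hst hct]
      have hemp : x ∉ (PySem.Set.empty : PySem.Set String) := by simp [PySem.Set.empty]
      constructor
      · rintro (h | ⟨h1, h2⟩ | ⟨h1, h2, h3⟩)
        · exact absurd h hemp
        · subst h1
          exact ⟨List.mem_cons_self, by simp [List.count_cons_self]; omega⟩
        · exact ⟨List.mem_cons_of_mem _ h1, by rwa [List.count_cons_of_ne (Ne.symm h2)]⟩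
      · rintro ⟨h1, h2⟩
        by_cases hxc : x = c
        · subst hxc
          rw [List.count_cons_self] at h2
          exact Or.inr (Or.inl ⟨rfl, by omega⟩)
        · have hxt : x ∈ t := by
            rcases List.mem_cons.mp h1 with h | h
            · exact absurd h hxc
            · exact h
          rw [List.count_cons_of_ne (Ne.symm hxc)] at h2
          exact Or.inr (Or.inr ⟨hxt, hxc, h2⟩)

-- B's scan is find? with the negated membership test
theorem pvScanNotCommon_eq_find? (com : PySem.Set String) (l : List String) :
    pvScanNotCommon com l = l.find? (fun c => !(PySem.Set.contains com c)) := by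
  induction l with
  | nil => rfl
  | cons a t ih =>
      simp only [pvScanNotCommon, List.find?]
      by_cases h : a ∈ com <;> simp [PySem.Set.contains, h, ih]

-- find? only depends on the predicate's values on the list
theorem find?_congr {α : Type} (p q : α → Bool) (l : List α) (h : ∀ x ∈ l, p x = q x) :
    l.find? p = l.find? q := by
  induction l with
  | nil => rfl
  | cons a t ih =>
      simp only [List.find?, h a List.mem_cons_self]
      cases hq : q a
      · simp only []
        exact ih fun x hx => h x (List.mem_cons_of_mem _ hx)
      · rfl

-- folding Set.add only appends
theorem foldl_setAdd_prefix {α : Type} [BEq α] [LawfulBEq α] (l : List α) (acc : PySem.Set α) :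
    ∃ t, l.foldl PySem.Set.add acc = acc ++ t := by
  induction l generalizing acc with
  | nil => exact ⟨[], by simp⟩
  | cons a t ih =>
      rw [List.foldl_cons]
      by_cases h : a ∈ acc
      · have ha : PySem.Set.add acc a = acc := by unfold PySem.Set.add; simp [h]
        rw [ha]; exact ih acc
      · have ha : PySem.Set.add acc a = acc ++ [a] := by unfold PySem.Set.add; simp [h]
        rw [ha]
        obtain ⟨s, hs⟩ := ih (acc ++ [a])
        exact ⟨a :: s, by simpa using hs⟩

-- membership after one Set.add step
theorem mem_setAdd {x a : String} {acc : PySem.Set String} (hx : x ∈ PySem.Set.add acc a) :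
    x ∈ acc ∨ x = a := by
  unfold PySem.Set.add at hx
  split at hx
  · exact Or.inl hx
  · rcases List.mem_append.mp hx with h1 | h1
    · exact Or.inl h1
    · exact Or.inr (by simpa using h1)

-- find? on the Set.add fold (ordered dedup) equals find? on the list, if the accumulator has no hit
theorem find?_foldl_setAdd (p : String → Bool) (l : List String) (acc : PySem.Set String)
    (hacc : ∀ x ∈ acc, p x = false) :
    List.find? p (l.foldl PySem.Set.add acc) = List.find? p l := by
  have hfacc : List.find? p acc = none :=
    List.find?_eq_none.mpr fun x hx => by simp [hacc x hx]
  induction l generalizing acc with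
  | nil => simpa using hfacc
  | cons a t ih =>
      rw [List.foldl_cons]
      by_cases hpa : p a
      · have hna : a ∉ acc := fun hm => by simp [hacc a hm] at hpa
        have hadd : PySem.Set.add acc a = acc ++ [a] := by unfold PySem.Set.add; simp [hna]
        obtain ⟨s, hs⟩ := foldl_setAdd_prefix t (acc ++ [a])
        rw [hadd, hs, List.append_assoc, List.find?_append, hfacc]
        simp [List.find?_cons_of_pos hpa]
      · have hpa' : p a = false := by simpa using hpa
        have hacc' : ∀ x ∈ PySem.Set.add acc a, p x = false := by
          intro x hx
          rcases mem_setAdd hx with h1 | h1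
          · exact hacc x h1
          · subst h1; exact hpa'
        rw [ih (PySem.Set.add acc a) hacc'
              (List.find?_eq_none.mpr fun x hx => by simp [hacc' x hx]),
            List.find?_cons_of_neg (by simp [hpa'])]

theorem find?_ofList (p : String → Bool) (l : List String) :
    List.find? p (PySem.Set.ofList l) = List.find? p l := by
  unfold PySem.Set.ofList
  exact find?_foldl_setAdd p l PySem.Set.empty (by intro x hx; simp [PySem.Set.empty] at hx)

-- ===== VERDICT (by name: the statement is the Claim_ definition above) =====
theorem first_uncommon_spec : Claim_equal_first_uncommon := by
  intro matrix n _
  unfold Spec_first_uncommon first_uncommon first_uncommon_alt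
  simp only [List.foldl_flatten.symm, PySem.Dict.foldl_insert_getD_add_one_eq_counter]
  rw [show matrix.flatMap (fun tup => tup) = matrix.flatten from List.flatMap_id]
  rw [PySem.Dict.items_counter, pvItemsBelow_map n (fun k => (List.count k matrix.flatten : Int)) _]
  rw [find?_ofList, pvScanNotCommon_eq_find?]
  set flat := matrix.flatten with hflat
  have hsorted : (PySem.List.sorted flat (fun x => x) false).Pairwise (· ≤ ·) := by
    simpa using PySem.List.sorted_pairwise flat (fun x => x)
  have hperm : (PySem.List.sorted flat (fun x => x) false).Perm flat :=
    PySem.List.sorted_perm flat (fun x => x) false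
  apply find?_congr
  intro x hx
  have hcount : (PySem.List.sorted flat (fun x => x) false).count x = flat.count x :=
    hperm.count_eq x
  have hmem : x ∈ pvRunLoop n (PySem.List.sorted flat (fun x => x) false) none 0 PySem.Set.empty ↔
      x ∈ flat ∧ n ≤ (flat.count x : Int) := by
    rw [mem_pvRunLoop n x _ hsorted, hperm.mem_iff, hcount]
  by_cases h : n ≤ (flat.count x : Int)
  · have hm : x ∈ pvRunLoop n (PySem.List.sorted flat (fun x => x) false) none 0 PySem.Set.empty :=
      hmem.mpr ⟨hx, h⟩
    simp [PySem.Set.contains, show ¬((flat.count x : Int) < n) from by omega]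
    exact hm
  · have hm : x ∉ pvRunLoop n (PySem.List.sorted flat (fun x => x) false) none 0 PySem.Set.empty :=
      fun hmm => h (hmem.mp hmm).2
    simp [PySem.Set.contains, show (flat.count x : Int) < n from by omega]
    exact hm
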